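-- pv_equiv track=rewrite | github.com/gonzalezulises/mas-control-mas-caos | book/tests/test_references.py | count_verified_references
-- ===== SOURCE A (Python) =====
-- def count_verified_references(refs: dict) -> tuple:
--     """Cuenta referencias verificadas vs pendientes"""
--     verified = 0
--     pending = 0
--
--     for ref in refs.get('references', []):
--         if ref.get('verified', False):
--             verified += 1
--         else:
--             pending += 1
--
--     return verified, pending
-- ===== SOURCE B (Python) =====
-- def count_verified_references(refs: dict) -> tuple:
--     """Cuenta referencias verificadas vs pendientes"""
--     lst = refs.get('references', [])
--
--     def go(lo, hi):
--         if lo >= hi: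
--             return (0, 0)
--         if hi - lo == 1:
--             return (1, 0) if lst[lo].get('verified', False) else (0, 1)
--         mid = (lo + hi) // 2
--         v1, p1 = go(lo, mid)
--         v2, p2 = go(mid, hi)
--         return (v1 + v2, p1 + p2)
--
--     return go(0, len(lst))
-- ===== Notes on version B (the rewrite author's own statement) =====
-- stated objective: alternative
-- what changed: B replaces A's single linear loop with two accumulators by a divide-and-conquer recursion: it splits the index range in half, counts each half recursively down to one-element leaves, and adds the (verified, pending) pairs; correct because the counts are additive over a partition of the list.
import Mathlib
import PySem

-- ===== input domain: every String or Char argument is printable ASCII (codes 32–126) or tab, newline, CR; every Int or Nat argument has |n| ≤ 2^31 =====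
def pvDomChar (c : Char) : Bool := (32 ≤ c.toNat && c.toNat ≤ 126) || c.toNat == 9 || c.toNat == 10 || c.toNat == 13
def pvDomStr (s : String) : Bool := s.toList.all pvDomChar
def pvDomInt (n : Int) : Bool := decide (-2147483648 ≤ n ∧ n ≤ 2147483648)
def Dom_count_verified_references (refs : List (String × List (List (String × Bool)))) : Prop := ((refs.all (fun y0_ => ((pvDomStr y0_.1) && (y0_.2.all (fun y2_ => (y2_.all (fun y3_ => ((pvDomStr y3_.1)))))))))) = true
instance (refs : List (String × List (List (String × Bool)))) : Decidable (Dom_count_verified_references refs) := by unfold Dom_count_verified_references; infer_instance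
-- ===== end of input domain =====

-- B changes: divide-and-conquer on the index range instead of a linear two-accumulator loop (objective: alternative).
-- ===== PORT A =====
-- helper: Python's ref.get('verified', False) on a dict given as an association list
def pvVerified (ref : List (String × Bool)) : Bool :=
  (PySem.Dict.mk ref).getD "verified" false

def count_verified_references (refs : List (String × List (List (String × Bool)))) : Int × Int :=
  let lst := (PySem.Dict.mk refs).getD "references" []
  lst.foldl (fun acc ref =>
    if pvVerified ref then (acc.1 + 1, acc.2) else (acc.1, acc.2 + 1)) ((0 : Int), (0 : Int))

-- ===== PORT B =====
-- go lo hi: counts of the segment lst[lo:hi] by halving the range (lst[lo] is valid at the leaf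
-- because the top call uses hi = lst.length; getD mirrors that in-range access exactly)
def pvGo (lst : List (List (String × Bool))) (lo hi : Nat) : Int × Int :=
  if lo ≥ hi then (0, 0)
  else if hi - lo = 1 then (if pvVerified (lst.getD lo []) then (1, 0) else (0, 1))
  else
    let mid := (lo + hi) / 2
    let l := pvGo lst lo mid
    let r := pvGo lst mid hi
    (l.1 + r.1, l.2 + r.2)
termination_by hi - lo
decreasing_by all_goals omega

def count_verified_references_alt (refs : List (String × List (List (String × Bool)))) : Int × Int :=
  let lst := (PySem.Dict.mk refs).getD "references" []
  pvGo lst 0 lst.length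

-- ===== PRECONDITION & SPEC =====
def Spec_count_verified_references (refs : List (String × List (List (String × Bool)))) (out : Int × Int) : Prop := out = count_verified_references_alt refs
instance (refs : List (String × List (List (String × Bool)))) (out : Int × Int) : Decidable (Spec_count_verified_references refs out) := by unfold Spec_count_verified_references; infer_instance

-- ===== CLAIM (what is proved, stated in full; the proofs are below) =====
def Claim_equal_count_verified_references : Prop := ∀ (refs : List (String × List (List (String × Bool)))), Dom_count_verified_references refs → Spec_count_verified_references refs (count_verified_references refs)

-- ===== LEMMAS AND PROOFS =====
theorem pvFoldA (l : List (List (String × Bool))) : ∀ (v p : Int),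
    l.foldl (fun acc ref => if pvVerified ref then (acc.1 + 1, acc.2) else (acc.1, acc.2 + 1)) (v, p)
      = (v + (l.countP pvVerified : Int), p + ((l.countP (fun r => !pvVerified r)) : Int)) := by
  induction l with
  | nil => intro v p; simp [List.countP]
  | cons h t ih =>
    intro v p
    by_cases hv : pvVerified h <;>
      simp [List.foldl, hv, ih] <;> ring

-- characterisation of pvGo: it returns the two counts of the segment lst[lo:hi]
theorem pvGo_eq (lst : List (List (String × Bool))) : ∀ (n lo hi : Nat), hi - lo = n →
    hi ≤ lst.length →
    pvGo lst lo hi = ((((lst.drop lo).take (hi - lo)).countP pvVerified : Int),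
                      (((lst.drop lo).take (hi - lo)).countP (fun r => !pvVerified r) : Int)) := by
  intro n
  induction n using Nat.strong_induction_on with
  | _ n ih =>
    intro lo hi hn hhi
    subst hn
    rw [pvGo]
    by_cases h0 : lo ≥ hi
    · have : hi - lo = 0 := by omega
      simp [h0, this, List.countP]
    · by_cases h1 : hi - lo = 1
      · have hlo : lo < lst.length := by omega
        have hdrop : lst.drop lo = lst[lo] :: lst.drop (lo + 1) :=
          List.drop_eq_getElem_cons hlo
        have hgd : lst.getD lo [] = lst[lo] := List.getD_eq_getElem lst [] hlo
        have htake : (lst.drop lo).take 1 = [lst[lo]] := by rw [hdrop]; rfl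
        rw [if_neg h0, if_pos h1, h1, htake, hgd]
        by_cases hv : pvVerified lst[lo] <;>
          simp [hv, List.countP_nil]
      · rw [if_neg h0, if_neg h1]
        have hlomid : lo < (lo + hi) / 2 := by omega
        have hmidhi : (lo + hi) / 2 < hi := by omega
        show ((pvGo lst lo ((lo+hi)/2)).1 + (pvGo lst ((lo+hi)/2) hi).1,
              (pvGo lst lo ((lo+hi)/2)).2 + (pvGo lst ((lo+hi)/2) hi).2) = _
        rw [ih ((lo+hi)/2 - lo) (by omega) lo ((lo+hi)/2) rfl (by omega),
            ih (hi - (lo+hi)/2) (by omega) ((lo+hi)/2) hi rfl hhi]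
        have hsplit : (lst.drop lo).take (hi - lo)
            = (lst.drop lo).take ((lo+hi)/2 - lo) ++ (lst.drop ((lo+hi)/2)).take (hi - (lo+hi)/2) := by
          have h2 : hi - lo = ((lo+hi)/2 - lo) + (hi - (lo+hi)/2) := by omega
          rw [h2, List.take_add]
          congr 1
          rw [List.drop_drop]
          congr 2
          omega
        simp [hsplit, List.countP_append]
-- ===== VERDICT (by name: the statement is the Claim_ definition above) =====
theorem count_verified_references_spec : Claim_equal_count_verified_references := by
  intro refs _
  unfold Spec_count_verified_references count_verified_references count_verified_references_alt
  set lst := (PySem.Dict.mk refs).getD "references" [] with hl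
  rw [pvFoldA, pvGo_eq lst lst.length 0 lst.length rfl (le_refl _)]
  simp
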